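-- pv_equiv track=rewrite | github.com/ptarau/PythonProvers | fhprovers.py | part2list
-- ===== SOURCE A (Python) =====
-- def part2list(N, pss):
--     res = []
--     l = len(pss)
--     for i in range(N):
--         for j in range(l):
--             if i in pss[j]:
--                 res.append(j)
--     return tuple(res)
-- ===== SOURCE B (Python) =====
-- def part2list(N, pss):
--     index = {}
--     for j, ps in enumerate(pss):
--         for x in dict.fromkeys(ps):
--             index.setdefault(x, []).append(j)
--     res = []
--     for i in range(N):
--         res.extend(index.get(i, []))
--     return tuple(res)
-- ===== Notes on version B (the rewrite author's own statement) =====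
-- stated objective: faster
-- what changed: Instead of scanning every set for every i in 0..N-1 (membership test per (i, set) pair), B inverts pss once into an element-to-list-of-set-indices dictionary and then concatenates the lookups for i in 0..N-1.
import Mathlib
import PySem

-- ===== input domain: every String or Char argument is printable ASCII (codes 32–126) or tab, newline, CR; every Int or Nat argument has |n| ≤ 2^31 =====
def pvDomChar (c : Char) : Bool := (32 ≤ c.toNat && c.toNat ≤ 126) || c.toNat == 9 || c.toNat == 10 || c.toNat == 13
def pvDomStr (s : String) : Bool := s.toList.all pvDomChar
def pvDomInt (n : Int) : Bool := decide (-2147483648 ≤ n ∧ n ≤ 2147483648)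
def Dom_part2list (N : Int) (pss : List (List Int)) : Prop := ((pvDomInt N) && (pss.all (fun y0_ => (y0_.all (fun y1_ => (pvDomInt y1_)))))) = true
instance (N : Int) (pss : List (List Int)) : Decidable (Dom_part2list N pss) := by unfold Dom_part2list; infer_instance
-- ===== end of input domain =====

-- B inverts pss once into an element → list-of-set-indices dictionary, then concatenates
-- the lookups for i in 0..N-1, instead of A's membership scan of every set for every i.

-- ===== PORT A =====
def part2list (N : Int) (pss : List (List Int)) : List Int :=
  let l : Int := pss.length
  (PySem.List.pyRange 0 N 1).foldl (fun res i =>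
    (PySem.List.pyRange 0 l 1).foldl (fun res j =>
      if (PySem.List.pyGetD pss j []).contains i then res ++ [j] else res) res) []

-- ===== PORT B =====
def part2list_alt (N : Int) (pss : List (List Int)) : List Int :=
  let index : PySem.Dict Int (List Int) :=
    (PySem.List.enumerate pss 0).foldl (fun d p =>
      (PySem.List.dedup p.2).foldl (fun d x => d.modify x [] (· ++ [p.1])) d)
      PySem.Dict.empty
  (PySem.List.pyRange 0 N 1).foldl (fun res i => res ++ index.getD i []) []

-- ===== PRECONDITION & SPEC =====
def Spec_part2list (N : Int) (pss : List (List Int)) (out : List Int) : Prop := out = part2list_alt N pss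
instance (N : Int) (pss : List (List Int)) (out : List Int) : Decidable (Spec_part2list N pss out) := by unfold Spec_part2list; infer_instance

-- ===== CLAIM (what is proved, stated in full; the proofs are below) =====
def Claim_equal_part2list : Prop := ∀ (N : Int) (pss : List (List Int)), Dom_part2list N pss → Spec_part2list N pss (part2list N pss)

-- ===== LEMMAS AND PROOFS =====

-- a Nodup list filtered by equality with i is [i] if i occurs, [] otherwise
theorem pvFilterBeqNodup {α : Type} [BEq α] [LawfulBEq α] (l : List α) (h : l.Nodup) (i : α) :
    l.filter (· == i) = if i ∈ l then [i] else [] := by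
  induction l with
  | nil => simp
  | cons a t ih =>
    simp only [List.nodup_cons] at h
    by_cases hai : a = i
    · subst hai
      have ht : List.filter (fun x => x == a) t = [] := by
        rw [List.filter_eq_nil_iff]
        intro x hx
        simp only [beq_iff_eq]
        exact fun he => h.1 (he ▸ hx)
      simp [ht]
    · simp [Ne.symm hai, hai, ih h.2]

theorem pv_filter_eq_flatMap {α : Type} (p : α → Bool) (l : List α) :
    l.filter p = l.flatMap (fun x => if p x then [x] else []) := by
  induction l with
  | nil => rfl
  | cons a t ih => by_cases h : p a <;> simp [h, ih]

-- inner loop of B's build: one set ps with index j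
theorem pv_inner_getD (ps : List Int) (j : Int) (d : PySem.Dict Int (List Int)) (i : Int) :
    ((PySem.List.dedup ps).foldl (fun d x => d.modify x [] (· ++ [j])) d).getD i []
      = d.getD i [] ++ (if ps.contains i then [j] else []) := by
  have hm : ((PySem.List.dedup ps).map (fun x => (x, j))).foldl
      (fun d p => d.modify p.1 [] (· ++ [p.2])) d
      = (PySem.List.dedup ps).foldl (fun d x => d.modify x [] (· ++ [j])) d :=
    List.foldl_map
  rw [← hm, PySem.Dict.getD_foldl_modify_append, List.filter_map]
  have hc : ((fun p => p.1 == i) ∘ (fun x => (x, j))) = fun x => x == i := rfl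
  rw [hc, pvFilterBeqNodup _ (PySem.List.nodup_dedup ps) i]
  by_cases h : i ∈ ps
  · simp [h]
  · simp [h]

-- whole build fold
theorem pv_build_getD (t : List (List Int)) (s : Int) (d : PySem.Dict Int (List Int)) (i : Int) :
    ((PySem.List.enumerate t s).foldl (fun d p =>
        (PySem.List.dedup p.2).foldl (fun d x => d.modify x [] (· ++ [p.1])) d) d).getD i []
      = d.getD i [] ++ (PySem.List.enumerate t s).flatMap
          (fun p => if p.2.contains i then [p.1] else []) := by
  induction t generalizing s d with
  | nil => simp [PySem.List.enumerate_nil]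
  | cons ps t ih =>
    rw [PySem.List.enumerate_cons]
    simp only [List.foldl_cons, List.flatMap_cons]
    rw [ih, pv_inner_getD]
    simp [List.append_assoc]

-- A's row i equals B's per-i lookup shape
theorem pv_rowA_eq (pss : List (List Int)) (i : Int) :
    (PySem.List.pyRange 0 (pss.length : Int) 1).filter (fun j => (PySem.List.pyGetD pss j []).contains i)
      = (PySem.List.enumerate pss 0).flatMap (fun p => if p.2.contains i then [p.1] else []) := by
  rw [PySem.List.enumerate_eq_map_pyRange pss [], List.flatMap_map]
  rw [pv_filter_eq_flatMap]
  simp [PySem.List.len_eq]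

-- ===== VERDICT (by name: the statement is the Claim_ definition above) =====
theorem part2list_spec : Claim_equal_part2list := by
  intro N pss _
  unfold Spec_part2list part2list part2list_alt
  simp only [PySem.List.foldl_append_if, PySem.List.foldl_append_eq_flatMap, List.nil_append]
  refine congrArg (fun f => List.flatMap f (PySem.List.pyRange 0 N 1)) ?_
  funext i
  rw [List.map_id_fun']
  rw [pv_rowA_eq pss i, pv_build_getD pss 0 PySem.Dict.empty i]
  simp [PySem.Dict.getD_empty]
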